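-- pv_equiv track=rewrite | github.com/hoanbka/advanced-algorithms | LongChain.py | bfs
-- ===== SOURCE A (Python) =====
-- def bfs(map):
--     ans = []
--     for i in range(len(map)):
--         for j in range(len(map[i])):
--             queue = [[i, j]]
--             curr = []
--
--             while len(queue) > 0:
--                 top = queue.pop()
--                 x , y = top[0], top[1]
--                 currValue = map[x][y]
--
--                 curr.append(currValue)
--
--                 directions = [[-1, 0], [1, 0], [0, 1], [0, -1]]
--                 for direction in directions:
--                     _x, _y = direction[0], direction[1]
--                     if x + _x >= 0  and x + _x <= len(map)-1 and y + _y >= 0 and y + _y <= len(map[i]) - 1 and \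
--                     map[x + _x][y + _y] == currValue + 1:
--                         queue.append([x + _x, y + _y])
--                         break
--             if len(curr) > 1: ans.append(curr)
--     ans.sort()
--     if len(ans) == 0: return []
--     return ans[0]
-- ===== SOURCE B (Python) =====
-- def _upd(best, v, l):
--     if l > 1:
--         cand = (v, l)
--         if best is None or cand < best:
--             return cand
--     return best
--
--
-- def bfs(map):
--     n = len(map)
--     best = None
--     for i in range(n):
--         for j in range(len(map[i])):
--             v = map[i][j]
--             x, y, l = i, j, 1
--             while True:
--                 nxt = None
--                 for dx, dy in ((-1, 0), (1, 0), (0, 1), (0, -1)):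
--                     a, b = x + dx, y + dy
--                     if 0 <= a < n and 0 <= b < len(map[a]) and map[a][b] == v + l:
--                         nxt = (a, b)
--                         break
--                 if nxt is None:
--                     break
--                 x, y = nxt
--                 l += 1
--             best = _upd(best, v, l)
--     return [] if best is None else list(range(best[0], best[0] + best[1]))
-- ===== Notes on version B (the rewrite author's own statement) =====
-- stated objective: faster
-- what changed: Instead of materialising one value-list per cell, collecting all of them and sorting the whole collection to take its first element, B tracks only the running lexicographic minimum of (start value, chain length) in one pass and rebuilds the answer as list(range(v, v+l)), exploiting that every chain is a run of consecutive integers, so the lexicographically smallest chain is the one with the smallest (start, length) pair.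
-- outside the precondition, e.g. on bfs([[1, 2], [1, 3], [1, 2], [0]]): A returns [0, 1], B returns [0, 1, 2, 3]; on bfs([[1], [2, 3]]): A raises IndexError, B returns [1, 2, 3]
import Mathlib
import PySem

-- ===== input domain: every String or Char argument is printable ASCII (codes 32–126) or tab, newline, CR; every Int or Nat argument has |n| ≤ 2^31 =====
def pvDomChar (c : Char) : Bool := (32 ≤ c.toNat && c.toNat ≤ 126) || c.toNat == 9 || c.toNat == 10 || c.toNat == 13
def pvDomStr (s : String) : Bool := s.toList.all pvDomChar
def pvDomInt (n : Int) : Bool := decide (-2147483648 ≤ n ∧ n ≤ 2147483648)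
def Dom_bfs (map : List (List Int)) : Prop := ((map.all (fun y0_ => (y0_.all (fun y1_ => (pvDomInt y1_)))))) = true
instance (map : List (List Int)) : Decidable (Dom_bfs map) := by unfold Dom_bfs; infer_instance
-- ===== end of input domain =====

-- B replaces A's collect-every-chain-then-sort by a single pass that keeps only the running
-- lexicographic minimum of (start value, chain length) and rebuilds the answer as an arithmetic
-- range; a timing run measures the resulting constant-factor speedup.

-- ===== PORT A =====
-- directions = [[-1, 0], [1, 0], [0, 1], [0, -1]]
def pvDirs : List (Int × Int) := [(-1, 0), (1, 0), (0, 1), (0, -1)]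

-- 'for direction in directions: if <bounds and value check>: queue.append(..); break'
-- (w is len(map[i]) of the OUTER loop's row i, exactly as A writes it).
-- pyGetD defaults never fire on Pre_ inputs: every index tested here is bounds-checked first.
def pvScanA (map : List (List Int)) (w x y cv : Int) : List (Int × Int) → Option (Int × Int)
  | [] => none
  | d :: ds =>
    if 0 ≤ x + d.1 ∧ x + d.1 ≤ PySem.List.len map - 1 ∧ 0 ≤ y + d.2 ∧ y + d.2 ≤ w - 1 ∧
        PySem.List.pyGetD (PySem.List.pyGetD map (x + d.1) []) (y + d.2) 0 = cv + 1 then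
      some (x + d.1, y + d.2)
    else pvScanA map w x y cv ds

-- 'while len(queue) > 0: top = queue.pop(); …'.  The fuel only bounds the iteration count:
-- values strictly increase along the walk, so on Pre_ inputs the loop runs at most
-- (number of cells) times and the fuel passed below is never exhausted.
def pvLoopA (map : List (List Int)) (w : Int) : Nat → List (Int × Int) → List Int → List Int
  | 0, _, curr => curr
  | fuel + 1, queue, curr =>
    if 0 < queue.length then
      match PySem.List.pop? queue with
      | none => curr   -- unreachable: queue is nonempty
      | some (top, rest) =>
        let cv := PySem.List.pyGetD (PySem.List.pyGetD map top.1 []) top.2 0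
        let curr' := curr ++ [cv]
        match pvScanA map w top.1 top.2 cv pvDirs with
        | some c => pvLoopA map w fuel (rest ++ [c]) curr'
        | none => pvLoopA map w fuel rest curr'
    else curr

def bfs (map : List (List Int)) : List Int :=
  let ans := (List.range map.length).foldl (fun ans i =>
    let w := (map.getD i []).length
    (List.range w).foldl (fun ans (j : Nat) =>
      let curr := pvLoopA map (w : Int) (map.length * w + 2) [((i : Int), (j : Int))] []
      if 1 < curr.length then ans ++ [curr] else ans) ans) []
  let s := PySem.List.sorted ans (fun x => x) false
  if s.length = 0 then [] else PySem.List.pyGetD s 0 []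

-- ===== PORT B =====
-- first neighbour (dx,dy)-order with value t; bounds use the CURRENT rows' lengths
def pvStepB (map : List (List Int)) (t x y : Int) : List (Int × Int) → Option (Int × Int)
  | [] => none
  | d :: ds =>
    if 0 ≤ x + d.1 ∧ x + d.1 < PySem.List.len map ∧ 0 ≤ y + d.2 ∧
        y + d.2 < PySem.List.len (PySem.List.pyGetD map (x + d.1) []) ∧
        PySem.List.pyGetD (PySem.List.pyGetD map (x + d.1) []) (y + d.2) 0 = t then
      some (x + d.1, y + d.2)
    else pvStepB map t x y ds

-- 'while True: … if nxt is None: break; …'.  Same fuel bound as in A's loop (never exhausted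
-- on Pre_ inputs: the walk visits pairwise-distinct cells).
def pvLoopB (map : List (List Int)) (v : Int) : Nat → Int → Int → Int → Int
  | 0, _, _, l => l
  | fuel + 1, x, y, l =>
    match pvStepB map (v + l) x y pvDirs with
    | none => l
    | some c => pvLoopB map v fuel c.1 c.2 (l + 1)

-- '_upd(best, v, l)': keep the smaller of best and (v, l) (tuple order), ignore chains of length 1
def pvBest (best : Option (Int × Int)) (v l : Int) : Option (Int × Int) :=
  if 1 < l then
    match best with
    | none => some (v, l)
    | some b => if v < b.1 ∨ (v = b.1 ∧ l < b.2) then some (v, l) else some b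
  else best

def bfs_alt (map : List (List Int)) : List Int :=
  let best := (List.range map.length).foldl (fun best i =>
    (List.range (map.getD i []).length).foldl (fun best (j : Nat) =>
      let v := PySem.List.pyGetD (PySem.List.pyGetD map (i : Int) []) (j : Int) 0
      let l := pvLoopB map v (map.length * (map.getD i []).length + 1) (i : Int) (j : Int) 1
      pvBest best v l) best) none
  match best with
  | none => []
  | some (v, l) => PySem.List.pyRange v (v + l) 1

-- ===== PRECONDITION & SPEC =====
-- Pre_ excludes ragged (non-rectangular) grids: there A bounds column indices by the START
-- row's length and indexes NEIGHBOUR rows with them, which raises IndexError on most such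
-- grids and accidentally truncates chains on the rest.
def Pre_bfs (map : List (List Int)) : Prop := ∀ row ∈ map, row.length = (map.headD []).length
instance (map : List (List Int)) : Decidable (Pre_bfs map) := by unfold Pre_bfs; infer_instance

def pvWitness_bfs : List (List Int) := [[1, 2], [4, 3]]

def Spec_bfs (map : List (List Int)) (out : List Int) : Prop := out = bfs_alt map
instance (map : List (List Int)) (out : List Int) : Decidable (Spec_bfs map out) := by unfold Spec_bfs; infer_instance

-- ===== CLAIM (what is proved, stated in full; the proofs are below) =====
def Claim_equal_bfs : Prop := ∀ (map : List (List Int)), Dom_bfs map → Pre_bfs map → Spec_bfs map (bfs map)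

-- ===== LEMMAS AND PROOFS =====

-- the uniform row length of a Pre_ grid
def pvM (map : List (List Int)) : Nat := (map.headD []).length

-- map[x][y]
def pvVal (map : List (List Int)) (x y : Int) : Int :=
  PySem.List.pyGetD (PySem.List.pyGetD map x []) y 0

-- the deterministic walk both programs perform, as a value list
def pvChain (map : List (List Int)) (w : Int) : Nat → Int → Int → List Int
  | 0, x, y => [pvVal map x y]
  | fuel + 1, x, y =>
    pvVal map x y ::
      (match pvScanA map w x y (pvVal map x y) pvDirs with
       | none => []
       | some c => pvChain map w fuel c.1 c.2)

def pvCells (n m : Nat) : List (Nat × Nat) :=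
  (List.range n).flatMap (fun i => (List.range m).map (fun j => (i, j)))

def pvPairOf (map : List (List Int)) (c : Nat × Nat) : Int × Int :=
  (pvVal map (c.1 : Int) (c.2 : Int),
   ((pvChain map (pvM map : Int) (map.length * pvM map + 1) (c.1 : Int) (c.2 : Int)).length : Int))

def pvF (p : Int × Int) : List Int := PySem.List.pyRange p.1 (p.1 + p.2) 1

def pvUpd (best : Option (Int × Int)) (p : Int × Int) : Option (Int × Int) :=
  if 1 < p.2 then
    match best with
    | none => some p
    | some b => if p.1 < b.1 ∨ (p.1 = b.1 ∧ p.2 < b.2) then some p else some b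
  else best

def pvLe (p q : Int × Int) : Prop := p.1 < q.1 ∨ (p.1 = q.1 ∧ p.2 ≤ q.2)

theorem pv_best_eq (best : Option (Int × Int)) (p : Int × Int) :
    pvBest best p.1 p.2 = pvUpd best p := by
  cases best <;> rfl

theorem pv_rowlen (map : List (List Int)) (h : Pre_bfs map) {a : Int}
    (h0 : 0 ≤ a) (h1 : a < (map.length : Int)) :
    (PySem.List.pyGetD map a []).length = pvM map := by
  rw [PySem.List.pyGetD_eq_getElem map [] h0 h1]
  exact h _ (map.getElem_mem _)

theorem pv_scan_eq (map : List (List Int)) (h : Pre_bfs map) (x y cv : Int)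
    (ds : List (Int × Int)) :
    pvStepB map (cv + 1) x y ds = pvScanA map (pvM map : Int) x y cv ds := by
  induction ds with
  | nil => rfl
  | cons d ds ih =>
    show (if _ then _ else _) = (if _ then _ else _)
    by_cases hc : 0 ≤ x + d.1 ∧ x + d.1 ≤ PySem.List.len map - 1 ∧ 0 ≤ y + d.2 ∧
        y + d.2 ≤ (pvM map : Int) - 1 ∧
        PySem.List.pyGetD (PySem.List.pyGetD map (x + d.1) []) (y + d.2) 0 = cv + 1
    · obtain ⟨h1, h2, h3, h4, h5⟩ := hc
      rw [PySem.List.len_eq] at h2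
      have hrow : (PySem.List.pyGetD map (x + d.1) []).length = pvM map :=
        pv_rowlen map h h1 (by omega)
      rw [if_pos, if_pos]
      · exact ⟨h1, by rw [PySem.List.len_eq]; omega, h3, h4, h5⟩
      · exact ⟨h1, by rw [PySem.List.len_eq]; omega, h3, by
          rw [PySem.List.len_eq, hrow]; omega, h5⟩
    · rw [if_neg, if_neg, ih]
      · exact hc
      · intro ⟨h1, h2, h3, h4, h5⟩
        rw [PySem.List.len_eq] at h2
        have hrow : (PySem.List.pyGetD map (x + d.1) []).length = pvM map :=
          pv_rowlen map h h1 (by omega)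
        rw [PySem.List.len_eq, hrow] at h4
        exact hc ⟨h1, by rw [PySem.List.len_eq]; omega, h3, by omega, h5⟩

theorem pv_scan_some (map : List (List Int)) (w x y cv : Int) (ds : List (Int × Int))
    (c : Int × Int) (h : pvScanA map w x y cv ds = some c) :
    0 ≤ c.1 ∧ c.1 < (map.length : Int) ∧ 0 ≤ c.2 ∧ c.2 < w ∧ pvVal map c.1 c.2 = cv + 1 := by
  induction ds with
  | nil => simp [pvScanA] at h
  | cons d ds ih =>
    rw [pvScanA] at h
    split at h
    · rename_i hc
      obtain ⟨h1, h2, h3, h4, h5⟩ := hc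
      rw [PySem.List.len_eq] at h2
      cases h
      exact ⟨h1, by omega, h3, by omega, h5⟩
    · exact ih h

theorem pv_lockstepA (map : List (List Int)) (w : Int) :
    ∀ (f : Nat) (x y : Int) (curr : List Int),
      pvLoopA map w (f + 1) [(x, y)] curr = curr ++ pvChain map w f x y := by
  intro f
  have hp : ∀ p : Int × Int, PySem.List.pop? [p] = some (p, ([] : List (Int × Int))) := by
    intro p
    simpa using PySem.List.pop?_last ([] : List (Int × Int)) p
  induction f with
  | zero =>
    intro x y curr
    simp only [pvLoopA, hp]
    cases hs : pvScanA map w x y (PySem.List.pyGetD (PySem.List.pyGetD map x []) y 0) pvDirs with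
    | none => simp [pvChain, pvVal]
    | some c => simp [pvChain, pvVal]
  | succ f ih =>
    intro x y curr
    simp only [pvLoopA, hp]
    cases hs : pvScanA map w x y (PySem.List.pyGetD (PySem.List.pyGetD map x []) y 0) pvDirs with
    | none => simp [pvChain, pvVal, hs]
    | some c =>
      have hih := ih c.1 c.2 (curr ++ [PySem.List.pyGetD (PySem.List.pyGetD map x []) y 0])
      simp only [pvChain, pvVal, hs]
      rw [show (curr ++ PySem.List.pyGetD (PySem.List.pyGetD map x []) y 0 :: pvChain map w f c.1 c.2)
            = (curr ++ [PySem.List.pyGetD (PySem.List.pyGetD map x []) y 0]) ++ pvChain map w f c.1 c.2 by simp,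
          ← hih]
      simp only [pvLoopA, hp]
      rfl

theorem pv_lockstepB (map : List (List Int)) (h : Pre_bfs map) :
    ∀ (f : Nat) (x y l v : Int),
      0 ≤ x → x < (map.length : Int) → 0 ≤ y → y < (pvM map : Int) →
      v + l - 1 = pvVal map x y →
      pvLoopB map v f x y l = l - 1 + ((pvChain map (pvM map : Int) f x y).length : Int) := by
  intro f
  induction f with
  | zero =>
    intro x y l v _ _ _ _ _
    simp [pvLoopB, pvChain]
  | succ f ih =>
    intro x y l v hx hx' hy hy' hv
    simp only [pvLoopB]
    rw [show v + l = pvVal map x y + 1 by omega, pv_scan_eq map h x y (pvVal map x y) pvDirs]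
    cases hs : pvScanA map (pvM map : Int) x y (pvVal map x y) pvDirs with
    | none => simp [pvChain, hs]
    | some c =>
      obtain ⟨hc1, hc2, hc3, hc4, hc5⟩ := pv_scan_some map _ x y _ pvDirs c hs
      have hih := ih c.1 c.2 (l + 1) v hc1 hc2 hc3 hc4 (by omega)
      simp only [pvChain, hs, hih, List.length_cons]
      push_cast
      ring

theorem pv_chain_range (map : List (List Int)) (w : Int) :
    ∀ (f : Nat) (x y : Int),
      pvChain map w f x y
        = PySem.List.pyRange (pvVal map x y)
            (pvVal map x y + ((pvChain map w f x y).length : Int)) 1 := by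
  intro f
  induction f with
  | zero =>
    intro x y
    simp [pvChain, PySem.List.pyRange_one_singleton]
  | succ f ih =>
    intro x y
    cases hs : pvScanA map w x y (pvVal map x y) pvDirs with
    | none => simp [pvChain, hs, PySem.List.pyRange_one_singleton]
    | some c =>
      obtain ⟨hc1, hc2, hc3, hc4, hc5⟩ := pv_scan_some map _ x y _ pvDirs c hs
      simp only [pvChain, hs, List.length_cons]
      rw [PySem.List.pyRange_one_cons (show pvVal map x y
            < pvVal map x y + (((pvChain map w f c.1 c.2).length + 1 : Nat) : Int) by push_cast; omega)]
      rw [show pvVal map x y + (((pvChain map w f c.1 c.2).length + 1 : Nat) : Int)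
            = (pvVal map x y + 1) + ((pvChain map w f c.1 c.2).length : Int) by push_cast; ring]
      rw [ih c.1 c.2, hc5]
      simp [PySem.List.length_pyRange_one]

theorem pv_le_append (xs ys : List Int) : xs ≤ xs ++ ys := by
  induction xs with
  | nil => cases ys with
    | nil => exact le_refl _
    | cons b t => exact le_of_lt List.Lex.nil
  | cons a t ih => exact List.cons_le_cons a ih

theorem pv_mono (p q : Int × Int) (hp : 1 ≤ p.2) (hq : 1 ≤ q.2) (hle : pvLe p q) :
    pvF p ≤ pvF q := by
  obtain ⟨p1, p2⟩ := p
  obtain ⟨q1, q2⟩ := q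
  simp only [pvLe] at hle
  simp only [pvF]
  have hp2 : (1 : Int) ≤ p2 := hp
  have hq2 : (1 : Int) ≤ q2 := hq
  rcases hle with hlt | ⟨heq, h2⟩
  · rw [PySem.List.pyRange_one_cons (show p1 < p1 + p2 by omega),
        PySem.List.pyRange_one_cons (show q1 < q1 + q2 by omega)]
    exact le_of_lt (List.Lex.rel hlt)
  · have heq' : p1 = q1 := heq
    have h2' : p2 ≤ q2 := h2
    subst heq'
    rw [PySem.List.pyRange_one_append p1 (p1 + p2) (p1 + q2) (by omega) (by omega)]
    exact pv_le_append _ _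

theorem pv_fold_min (ps : List (Int × Int)) : ∀ acc : Option (Int × Int),
    (ps.foldl pvUpd acc = none → acc = none ∧ ∀ q ∈ ps, ¬ 1 < q.2) ∧
    (∀ m, ps.foldl pvUpd acc = some m →
      (acc = some m ∨ (m ∈ ps ∧ 1 < m.2)) ∧
      (∀ b, acc = some b → pvLe m b) ∧
      (∀ q ∈ ps, 1 < q.2 → pvLe m q)) := by
  induction ps with
  | nil =>
    intro acc
    constructor
    · intro h
      simp only [List.foldl_nil] at h
      exact ⟨h, by simp⟩
    · intro m hm
      simp only [List.foldl_nil] at hm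
      refine ⟨Or.inl hm, fun b hb => ?_, by simp⟩
      have hbm : m = b := by rw [hm] at hb; exact Option.some.inj hb
      subst hbm
      simp [pvLe]
  | cons p ps ih =>
    intro acc
    have H := ih (pvUpd acc p)
    simp only [List.foldl_cons]
    constructor
    · intro hnone
      obtain ⟨hacc', hall⟩ := H.1 hnone
      by_cases h2 : 1 < p.2
      · exfalso
        cases acc with
        | none => simp [pvUpd, h2] at hacc'
        | some b =>
          simp only [pvUpd, if_pos h2] at hacc'
          split at hacc' <;> simp_all
      · unfold pvUpd at hacc'
        rw [if_neg h2] at hacc'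
        refine ⟨hacc', fun q hq => ?_⟩
        rcases List.mem_cons.1 hq with rfl | hq'
        · exact h2
        · exact hall q hq'
    · intro m hm
      obtain ⟨hmem, hminacc, hminq⟩ := H.2 m hm
      by_cases h2 : 1 < p.2
      · cases acc with
        | none =>
          have hupd : pvUpd none p = some p := by unfold pvUpd; rw [if_pos h2]
          rw [hupd] at hmem hminacc
          refine ⟨?_, fun b hb => by simp at hb, fun q hq hq2 => ?_⟩
          · rcases hmem with hpm | hmm
            · exact Or.inr ⟨by rw [← Option.some.inj hpm]; exact List.mem_cons_self, by
                rw [← Option.some.inj hpm]; exact h2⟩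
            · exact Or.inr ⟨List.mem_cons_of_mem _ hmm.1, hmm.2⟩
          · rcases List.mem_cons.1 hq with rfl | hq'
            · exact hminacc q rfl
            · exact hminq q hq' hq2
        | some b =>
          by_cases h3 : p.1 < b.1 ∨ (p.1 = b.1 ∧ p.2 < b.2)
          · have hupd : pvUpd (some b) p = some p := by simp [pvUpd, h2, h3]
            rw [hupd] at hmem hminacc
            have hmp : pvLe m p := hminacc p rfl
            refine ⟨?_, fun b' hb' => ?_, fun q hq hq2 => ?_⟩
            · rcases hmem with hpm | hmm
              · exact Or.inr ⟨by rw [← Option.some.inj hpm]; exact List.mem_cons_self, by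
                  rw [← Option.some.inj hpm]; exact h2⟩
              · exact Or.inr ⟨List.mem_cons_of_mem _ hmm.1, hmm.2⟩
            · have hb'b : b' = b := Option.some.inj hb'.symm
              subst hb'b
              unfold pvLe at *
              omega
            · rcases List.mem_cons.1 hq with rfl | hq'
              · exact hmp
              · exact hminq q hq' hq2
          · have hupd : pvUpd (some b) p = some b := by simp [pvUpd, h2, h3]
            rw [hupd] at hmem hminacc
            have hmb : pvLe m b := hminacc b rfl
            refine ⟨?_, fun b' hb' => ?_, fun q hq hq2 => ?_⟩
            · rcases hmem with hbm | hmm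
              · exact Or.inl hbm
              · exact Or.inr ⟨List.mem_cons_of_mem _ hmm.1, hmm.2⟩
            · have : b' = b := Option.some.inj hb'.symm
              subst this
              exact hmb
            · rcases List.mem_cons.1 hq with rfl | hq'
              · unfold pvLe at *
                omega
              · exact hminq q hq' hq2
      · have hupd : pvUpd acc p = acc := by unfold pvUpd; rw [if_neg h2]
        rw [hupd] at hmem hminacc
        refine ⟨?_, hminacc, fun q hq hq2 => ?_⟩
        · rcases hmem with h | hmm
          · exact Or.inl h
          · exact Or.inr ⟨List.mem_cons_of_mem _ hmm.1, hmm.2⟩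
        · rcases List.mem_cons.1 hq with rfl | hq'
          · exact absurd hq2 h2
          · exact hminq q hq' hq2

-- the same sort, with the instances the order lemmas of the library expect (they are defeq)
def pvSorted (xs : List (List Int)) : List (List Int) :=
  @PySem.List.sorted (List Int) (List Int) List.instLinearOrder.toLT LinearOrder.toDecidableLT
    xs (fun x => x) false

theorem pv_sorted_eq (xs : List (List Int)) :
    PySem.List.sorted xs (fun x => x) false = pvSorted xs := by
  unfold pvSorted
  congr 1

theorem pv_main (ps : List (Int × Int)) :
    (let s := PySem.List.sorted
        (ps.foldl (fun ans p => if 1 < p.2 then ans ++ [pvF p] else ans) []) (fun x => x) false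
     if s.length = 0 then [] else PySem.List.pyGetD s 0 [])
    = match ps.foldl pvUpd none with
      | none => []
      | some p => pvF p := by
  have hfold : ps.foldl (fun ans p => if 1 < p.2 then ans ++ [pvF p] else ans) []
      = (ps.filter (fun p => decide (1 < p.2))).map pvF := by
    have h := PySem.List.foldl_append_if (fun p : Int × Int => decide (1 < p.2)) pvF ps []
    simpa using h
  simp only [hfold]
  rw [pv_sorted_eq]
  have hmin := pv_fold_min ps none
  cases hq : ps.filter (fun p => decide (1 < p.2)) with
  | nil =>
    cases hr : ps.foldl pvUpd none with
    | none => simp [pvSorted, PySem.List.sorted]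
    | some mn =>
      exfalso
      rcases (hmin.2 mn hr).1 with h | ⟨hmem, h2⟩
      · exact absurd h (by simp)
      · have : mn ∈ ps.filter (fun p => decide (1 < p.2)) := List.mem_filter.2 ⟨hmem, by simpa using h2⟩
        rw [hq] at this
        exact List.not_mem_nil this
  | cons q0 qt =>
    have hsne : pvSorted ((q0 :: qt).map pvF) ≠ [] := by
      rw [← pv_sorted_eq, Ne, PySem.List.sorted_eq_nil_iff]
      simp
    cases hs : pvSorted ((q0 :: qt).map pvF) with
    | nil => exact absurd hs hsne
    | cons hd tl =>
      cases hr : ps.foldl pvUpd none with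
      | none =>
        exfalso
        have hq0 : q0 ∈ ps.filter (fun p => decide (1 < p.2)) := by rw [hq]; exact List.mem_cons_self
        have := (hmin.1 hr).2 q0 (List.mem_filter.1 hq0).1
        exact this (by simpa using (List.mem_filter.1 hq0).2)
      | some mn =>
        rcases (hmin.2 mn hr).1 with h | ⟨hmem, h2⟩
        · exact absurd h (by simp)
        · have hminq := (hmin.2 mn hr).2.2
          have hmnf : mn ∈ ps.filter (fun p => decide (1 < p.2)) := List.mem_filter.2 ⟨hmem, by simpa using h2⟩
          rw [hq] at hmnf
          have hfmem : pvF mn ∈ (q0 :: qt).map pvF := List.mem_map_of_mem hmnf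
          have h1 : hd ≤ pvF mn :=
            PySem.List.key_head_sorted_le _ (fun x => x) (by unfold pvSorted at hs; exact hs)
              (pvF mn) hfmem
          have hs2 : PySem.List.sorted ((q0 :: qt).map pvF) (fun x => x) false = hd :: tl := by
            rw [pv_sorted_eq]
            exact hs
          have hhd : hd ∈ (q0 :: qt).map pvF := by
            rw [← PySem.List.mem_sorted _ (fun x => x) false, hs2]
            exact List.mem_cons_self
          rcases List.mem_map.1 hhd with ⟨q1, hq1, rfl⟩
          have hq1' : q1 ∈ ps.filter (fun p => decide (1 < p.2)) := by rw [hq]; exact hq1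
          have hq1m := List.mem_filter.1 hq1'
          have h2' : pvF mn ≤ pvF q1 :=
            pv_mono mn q1 (by omega) (by have := hq1m.2; simp at this; omega)
              (hminq q1 hq1m.1 (by simpa using hq1m.2))
          simp only [List.length_cons, PySem.List.pyGetD_zero]
          simp only [if_neg (by simp : ¬ (tl.length + 1 = 0)), List.getD]
          simpa using (le_antisymm h2' h1).symm

theorem pv_bfs_eq (map : List (List Int)) (h : Pre_bfs map) :
    bfs map =
      (let s := PySem.List.sorted
          (((pvCells map.length (pvM map)).map (pvPairOf map)).foldl
            (fun ans p => if 1 < p.2 then ans ++ [pvF p] else ans) []) (fun x => x) false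
       if s.length = 0 then [] else PySem.List.pyGetD s 0 []) := by
  have hm : ∀ i ∈ List.range map.length, (map.getD i []).length = pvM map := by
    intro i hi
    rw [List.getD_eq_getElem _ _ (List.mem_range.1 hi)]
    exact h _ (map.getElem_mem _)
  have hcell : ∀ i j : Nat,
      pvLoopA map (pvM map : Int) (map.length * pvM map + 2) [((i : Int), (j : Int))] []
        = pvF (pvPairOf map (i, j)) := by
    intro i j
    rw [show map.length * pvM map + 2 = (map.length * pvM map + 1) + 1 from rfl,
        pv_lockstepA map (pvM map : Int) (map.length * pvM map + 1) (i : Int) (j : Int) []]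
    rw [List.nil_append]
    exact pv_chain_range map _ _ (i : Int) (j : Int)
  have hans : (List.range map.length).foldl (fun ans i =>
        (List.range (map.getD i []).length).foldl (fun ans (j : Nat) =>
          if 1 < (pvLoopA map ((map.getD i []).length : Int)
              (map.length * (map.getD i []).length + 2) [((i : Int), (j : Int))] []).length then
            ans ++ [pvLoopA map ((map.getD i []).length : Int)
              (map.length * (map.getD i []).length + 2) [((i : Int), (j : Int))] []]
          else ans) ans) []
      = ((pvCells map.length (pvM map)).map (pvPairOf map)).foldl
          (fun ans p => if 1 < p.2 then ans ++ [pvF p] else ans) [] := by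
    rw [PySem.List.foldl_congr_mem _ _ (fun ans i =>
        (List.range (pvM map)).foldl (fun ans j =>
          if 1 < (pvPairOf map (i, j)).2 then ans ++ [pvF (pvPairOf map (i, j))] else ans) ans) []
      (by
        intro acc i hi
        rw [hm i hi]
        refine PySem.List.foldl_congr_mem _ _ _ _ ?_
        intro acc' j hj
        rw [hcell i j]
        have hcond : (1 < (pvF (pvPairOf map (i, j))).length) ↔ (1 < (pvPairOf map (i, j)).2) := by
          simp only [pvF, PySem.List.length_pyRange_one, add_sub_cancel_left]
          omega
        rw [if_congr hcond rfl rfl])]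
    rw [show (fun (ans : List (List Int)) (i : Nat) =>
          (List.range (pvM map)).foldl (fun ans j =>
            if 1 < (pvPairOf map (i, j)).2 then ans ++ [pvF (pvPairOf map (i, j))] else ans) ans)
        = (fun (ans : List (List Int)) (i : Nat) =>
            (((List.range (pvM map)).map (fun j => (i, j))).foldl (fun ans c =>
              if 1 < (pvPairOf map c).2 then ans ++ [pvF (pvPairOf map c)] else ans) ans)) from by
      funext ans i
      rw [List.foldl_map]]
    rw [← List.foldl_flatMap]
    conv_rhs => rw [List.foldl_map]
    simp only [pvCells]
  simp only [bfs]
  rw [hans]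

theorem pv_alt_eq (map : List (List Int)) (h : Pre_bfs map) :
    bfs_alt map =
      (match ((pvCells map.length (pvM map)).map (pvPairOf map)).foldl pvUpd none with
       | none => []
       | some p => pvF p) := by
  have hm : ∀ i ∈ List.range map.length, (map.getD i []).length = pvM map := by
    intro i hi
    rw [List.getD_eq_getElem _ _ (List.mem_range.1 hi)]
    exact h _ (map.getElem_mem _)
  have hbest : (List.range map.length).foldl (fun best i =>
        (List.range (map.getD i []).length).foldl (fun best (j : Nat) =>
          pvBest best (PySem.List.pyGetD (PySem.List.pyGetD map (i : Int) []) (j : Int) 0)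
            (pvLoopB map (PySem.List.pyGetD (PySem.List.pyGetD map (i : Int) []) (j : Int) 0)
              (map.length * (map.getD i []).length + 1) (i : Int) (j : Int) 1)) best) none
      = ((pvCells map.length (pvM map)).map (pvPairOf map)).foldl pvUpd none := by
    rw [PySem.List.foldl_congr_mem _ _ (fun best i =>
        (List.range (pvM map)).foldl (fun best j => pvUpd best (pvPairOf map (i, j))) best) none
      (by
        intro acc i hi
        rw [hm i hi]
        refine PySem.List.foldl_congr_mem _ _ _ _ ?_
        intro acc' j hj
        have hl : pvLoopB map (PySem.List.pyGetD (PySem.List.pyGetD map (i : Int) []) (j : Int) 0)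
            (map.length * pvM map + 1) (i : Int) (j : Int) 1 = (pvPairOf map (i, j)).2 := by
          rw [pv_lockstepB map h (map.length * pvM map + 1) (i : Int) (j : Int) 1
              (PySem.List.pyGetD (PySem.List.pyGetD map (i : Int) []) (j : Int) 0)
              (by positivity) (by exact_mod_cast List.mem_range.1 hi)
              (by positivity) (by exact_mod_cast List.mem_range.1 hj)
              (by simp [pvVal])]
          simp [pvPairOf]
        rw [hl]
        rw [show PySem.List.pyGetD (PySem.List.pyGetD map (i : Int) []) (j : Int) 0
              = (pvPairOf map (i, j)).1 from rfl]
        exact pv_best_eq acc' (pvPairOf map (i, j)))]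
    conv_rhs => rw [List.foldl_map]
    rw [show (fun (best : Option (Int × Int)) (i : Nat) =>
          (List.range (pvM map)).foldl (fun best j => pvUpd best (pvPairOf map (i, j))) best)
        = (fun (best : Option (Int × Int)) (i : Nat) =>
            (((List.range (pvM map)).map (fun j => (i, j))).foldl
              (fun best c => pvUpd best (pvPairOf map c)) best)) from by
      funext best i
      rw [List.foldl_map]]
    rw [← List.foldl_flatMap]
    simp only [pvCells]
  simp only [bfs_alt]
  rw [hbest]
  cases List.foldl pvUpd none ((pvCells map.length (pvM map)).map (pvPairOf map)) with
  | none => rfl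
  | some p =>
    obtain ⟨v, l⟩ := p
    rfl

-- ===== VERDICT (by name: the statement is the Claim_ definition above) =====
theorem bfs_spec : Claim_equal_bfs := by
  intro map _ hpre
  unfold Spec_bfs
  rw [pv_bfs_eq map hpre, pv_alt_eq map hpre, pv_main]
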